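-- pv_equiv track=rewrite | github.com/thanhtungpfiev/ClassicalAlgorithm | CompetencyPratice/Competency/SourceCode/CodingCompetencySourceCode/BinarySearch/ABCDEF/ABCDEF.py | searching
-- ===== SOURCE A (Python) =====
-- from bisect import bisect_left, bisect_right
-- from typing import List
--
-- def searching(v: List[int]) -> int:
--     result = 0
--     v1 = []
--     v2 = []
--     for i1 in range(len(v)):
--         for i2 in range(len(v)):
--             for i3 in range(len(v)):
--                 v1.append(v[i1] * v[i2] + v[i3])
--                 if (v[i3] != 0):
--                     v2.append((v[i1] + v[i2]) * v[i3])
--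
--     v1.sort()
--     v2.sort()
--     for i in range(len(v1)):
--         lo = bisect_left(v2, v1[i])
--         hi = bisect_right(v2, v1[i])
--         result += hi - lo
--     return result
-- ===== SOURCE B (Python) =====
-- from collections import Counter
-- from typing import List
--
-- def searching(v: List[int]) -> int:
--     counts = Counter((x + y) * z for x in v for y in v for z in v if z != 0)
--     return sum(counts[x * y + z] for x in v for y in v for z in v)
-- ===== Notes on version B (the rewrite author's own statement) =====
-- stated objective: alternative
-- what changed: Replaces building, sorting and binary-searching two n^3-element lists with a single Counter hash of the (d+e)*f values and a direct sum of lookups for each a*b+c value; intended as faster (O(n^3) vs O(n^3 log n), measured 3.48x at n=64) but both time out at n=256, so no speed is claimed.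
import Mathlib
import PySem

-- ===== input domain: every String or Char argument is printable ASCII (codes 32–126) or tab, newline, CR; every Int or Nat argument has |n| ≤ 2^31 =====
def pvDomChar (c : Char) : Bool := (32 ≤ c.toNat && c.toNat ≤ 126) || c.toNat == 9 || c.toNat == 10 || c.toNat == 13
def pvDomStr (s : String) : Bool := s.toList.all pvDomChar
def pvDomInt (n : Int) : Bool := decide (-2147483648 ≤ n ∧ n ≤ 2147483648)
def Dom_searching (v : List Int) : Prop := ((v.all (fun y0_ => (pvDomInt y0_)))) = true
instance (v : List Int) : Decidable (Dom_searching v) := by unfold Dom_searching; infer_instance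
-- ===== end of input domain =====

-- B replaces A's sort-both-n^3-lists-then-bisect counting with a Counter hash of the
-- (d+e)*f values and a direct sum of lookups — same exact result, no sorting.

-- ===== PORT A =====
def searching (v : List Int) : Int :=
  let st :=
    (PySem.List.pyRange 0 (PySem.List.len v) 1).foldl (fun st i1 =>
      (PySem.List.pyRange 0 (PySem.List.len v) 1).foldl (fun st i2 =>
        (PySem.List.pyRange 0 (PySem.List.len v) 1).foldl (fun st i3 =>
          ( st.1 ++ [PySem.List.pyGetD v i1 0 * PySem.List.pyGetD v i2 0 + PySem.List.pyGetD v i3 0],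
            if PySem.List.pyGetD v i3 0 ≠ 0 then
              st.2 ++ [(PySem.List.pyGetD v i1 0 + PySem.List.pyGetD v i2 0) * PySem.List.pyGetD v i3 0]
            else st.2 )) st) st) (([] : List Int), ([] : List Int))
  let v1 := PySem.List.sorted st.1 (fun x => x)
  let v2 := PySem.List.sorted st.2 (fun x => x)
  (PySem.List.pyRange 0 (PySem.List.len v1) 1).foldl (fun result i =>
    result + ((PySem.List.bisectRight v2 (PySem.List.pyGetD v1 i 0) : Int)
              - (PySem.List.bisectLeft v2 (PySem.List.pyGetD v1 i 0) : Int))) 0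

-- ===== PORT B =====
def searching_alt (v : List Int) : Int :=
  let counts := PySem.Dict.counter
    (v.flatMap (fun x => v.flatMap (fun y =>
      (v.filter (fun z => decide (z ≠ 0))).map (fun z => (x + y) * z))))
  ((v.flatMap (fun x => v.flatMap (fun y => v.map (fun z => x * y + z)))).map
    (fun t => counts.getD t 0)).sum

-- ===== PRECONDITION & SPEC =====
def Spec_searching (v : List Int) (out : Int) : Prop := out = searching_alt v
instance (v : List Int) (out : Int) : Decidable (Spec_searching v out) := by unfold Spec_searching; infer_instance

-- ===== CLAIM (what is proved, stated in full; the proofs are below) =====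
def Claim_equal_searching : Prop := ∀ (v : List Int), Dom_searching v → Spec_searching v (searching v)

-- ===== LEMMAS AND PROOFS =====

-- the two lists A accumulates, in generation order
def pvL1 (v : List Int) : List Int :=
  v.flatMap (fun x => v.flatMap (fun y => v.map (fun z => x * y + z)))
def pvL2 (v : List Int) : List Int :=
  v.flatMap (fun x => v.flatMap (fun y =>
    (v.filter (fun z => decide (z ≠ 0))).map (fun z => (x + y) * z)))

-- a predicate true exactly on the first n positions has countP = n
theorem pv_countP_of_prefix (xs : List Int) (p : Int → Bool) (n : Nat) (hn : n ≤ xs.length)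
    (h : ∀ j (hj : j < xs.length), p xs[j] = decide (j < n)) : xs.countP p = n := by
  induction xs generalizing n with
  | nil => simp at hn; simp [hn]
  | cons a t ih =>
    have h0 := h 0 (by simp)
    cases n with
    | zero =>
      simp at h0
      have hrec := ih 0 (Nat.zero_le _) (fun j hj => by
        have := h (j+1) (by simpa using Nat.succ_lt_succ hj)
        simpa using this)
      simp [List.countP_cons, h0, hrec]
    | succ n =>
      simp at h0
      have hrec := ih n (by simpa using hn) (fun j hj => by
        have := h (j+1) (by simpa using Nat.succ_lt_succ hj)
        simpa [Nat.succ_lt_succ_iff] using this)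
      simp [List.countP_cons, h0, hrec]

theorem pv_countP_le_split (xs : List Int) (x : Int) :
    xs.countP (fun y => decide (y ≤ x)) = xs.countP (fun y => decide (y < x)) + xs.count x := by
  induction xs with
  | nil => simp
  | cons a t ih =>
    rw [List.countP_cons, List.countP_cons, List.count_cons]
    rcases lt_trichotomy a x with h | h | h
    · simp [le_of_lt h, h, ne_of_lt h, beq_iff_eq]
      omega
    · subst h
      simp [lt_irrefl]
      omega
    · simp [not_le.mpr h, not_lt.mpr (le_of_lt h), ne_of_gt h, beq_iff_eq]
      omega

-- on a sorted list, bisect_right - bisect_left is the multiplicity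
theorem pv_bisect_diff (xs : List Int) (x : Int) (hs : List.Pairwise (· ≤ ·) xs) :
    (PySem.List.bisectRight xs x : Int) - (PySem.List.bisectLeft xs x : Int) = (xs.count x : Int) := by
  obtain ⟨hL1, hL2, hL3⟩ := PySem.List.bisectLeft_spec xs x hs
  obtain ⟨hR1, hR2, hR3⟩ := PySem.List.bisectRight_spec xs x hs
  have hL : xs.countP (fun y => decide (y < x)) = PySem.List.bisectLeft xs x := by
    refine pv_countP_of_prefix xs _ _ hL1 (fun j hj => ?_)
    by_cases hjb : j < PySem.List.bisectLeft xs x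
    · simp [hL2 j hj hjb, hjb]
    · have := hL3 j hj (by omega)
      simp [not_lt.mpr this, hjb]
  have hR : xs.countP (fun y => decide (y ≤ x)) = PySem.List.bisectRight xs x := by
    refine pv_countP_of_prefix xs _ _ hR1 (fun j hj => ?_)
    by_cases hjb : j < PySem.List.bisectRight xs x
    · simp [hR2 j hj hjb, hjb]
    · have := hR3 j hj (by omega)
      simp [not_le.mpr this, hjb]
  have := pv_countP_le_split xs x
  omega

-- A's triple index loop builds exactly (pvL1 v, pvL2 v)
theorem pv_build_eq (v : List Int) :
    (PySem.List.pyRange 0 (PySem.List.len v) 1).foldl (fun st i1 =>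
      (PySem.List.pyRange 0 (PySem.List.len v) 1).foldl (fun st i2 =>
        (PySem.List.pyRange 0 (PySem.List.len v) 1).foldl (fun st i3 =>
          ( st.1 ++ [PySem.List.pyGetD v i1 0 * PySem.List.pyGetD v i2 0 + PySem.List.pyGetD v i3 0],
            if PySem.List.pyGetD v i3 0 ≠ 0 then
              st.2 ++ [(PySem.List.pyGetD v i1 0 + PySem.List.pyGetD v i2 0) * PySem.List.pyGetD v i3 0]
            else st.2 )) st) st) (([] : List Int), ([] : List Int))
    = (pvL1 v, pvL2 v) := by
  have h3 : ∀ (x y : Int) (ac : List Int × List Int),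
      List.foldl (fun st z => ((st.1 ++ [x * y + z] : List Int),
        if z ≠ 0 then st.2 ++ [(x + y) * z] else st.2)) ac v
      = (ac.1 ++ v.map (fun z => x * y + z),
         ac.2 ++ (v.filter (fun z => decide (z ≠ 0))).map (fun z => (x + y) * z)) := by
    intro x y ⟨a, b⟩
    rw [PySem.List.foldl_prod_mk (f := fun a z => a ++ [x * y + z])
        (g := fun b z => if z ≠ 0 then b ++ [(x + y) * z] else b)]
    rw [PySem.List.foldl_append_singleton_eq_map, PySem.List.foldl_append_ite]
  have h2 : ∀ (x : Int) (ac : List Int × List Int),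
      List.foldl (fun st y =>
        List.foldl (fun st z => ((st.1 ++ [x * y + z] : List Int),
          if z ≠ 0 then st.2 ++ [(x + y) * z] else st.2)) st v) ac v
      = (ac.1 ++ v.flatMap (fun y => v.map (fun z => x * y + z)),
         ac.2 ++ v.flatMap (fun y => (v.filter (fun z => decide (z ≠ 0))).map (fun z => (x + y) * z))) := by
    intro x ⟨a, b⟩
    rw [PySem.List.foldl_congr_mem v _
        (fun st y => (st.1 ++ v.map (fun z => x * y + z),
          st.2 ++ (v.filter (fun z => decide (z ≠ 0))).map (fun z => (x + y) * z)))
        _ (fun ac y _ => h3 x y ac)]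
    rw [PySem.List.foldl_prod_mk (f := fun a y => a ++ v.map (fun z => x * y + z))
        (g := fun b y => b ++ (v.filter (fun z => decide (z ≠ 0))).map (fun z => (x + y) * z))]
    rw [PySem.List.foldl_append_eq_flatMap, PySem.List.foldl_append_eq_flatMap]
  -- convert the index loops (over range(len(v))) into loops over v's elements
  rw [PySem.List.foldl_pyRange_zero_pyGetD v 0
      (f := fun st x =>
        (PySem.List.pyRange 0 (PySem.List.len v) 1).foldl (fun st i2 =>
          (PySem.List.pyRange 0 (PySem.List.len v) 1).foldl (fun st i3 =>
            ( st.1 ++ [x * PySem.List.pyGetD v i2 0 + PySem.List.pyGetD v i3 0],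
              if PySem.List.pyGetD v i3 0 ≠ 0 then
                st.2 ++ [(x + PySem.List.pyGetD v i2 0) * PySem.List.pyGetD v i3 0]
              else st.2 )) st) st)]
  rw [PySem.List.foldl_congr_mem v _
      (fun st x => List.foldl (fun st y =>
        List.foldl (fun st z => ((st.1 ++ [x * y + z] : List Int),
          if z ≠ 0 then st.2 ++ [(x + y) * z] else st.2)) st v) st v)
      _ ?_]
  · rw [PySem.List.foldl_congr_mem v _
        (fun st x => ((st.1 ++ v.flatMap (fun y => v.map (fun z => x * y + z)) : List Int),
          st.2 ++ v.flatMap (fun y => (v.filter (fun z => decide (z ≠ 0))).map (fun z => (x + y) * z))))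
        _ (fun ac x _ => h2 x ac)]
    rw [PySem.List.foldl_prod_mk
        (f := fun a x => a ++ v.flatMap (fun y => v.map (fun z => x * y + z)))
        (g := fun b x => b ++ v.flatMap (fun y => (v.filter (fun z => decide (z ≠ 0))).map (fun z => (x + y) * z)))]
    rw [PySem.List.foldl_append_eq_flatMap, PySem.List.foldl_append_eq_flatMap]
    simp [pvL1, pvL2]
  · intro ac x _
    rw [PySem.List.foldl_pyRange_zero_pyGetD v 0
        (f := fun st y =>
          (PySem.List.pyRange 0 (PySem.List.len v) 1).foldl (fun st i3 =>
            ( st.1 ++ [x * y + PySem.List.pyGetD v i3 0],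
              if PySem.List.pyGetD v i3 0 ≠ 0 then
                st.2 ++ [(x + y) * PySem.List.pyGetD v i3 0]
              else st.2 )) st)]
    refine PySem.List.foldl_congr_mem v _ _ _ (fun ac' y _ => ?_)
    rw [PySem.List.foldl_pyRange_zero_pyGetD v 0
        (f := fun st z => ((st.1 ++ [x * y + z] : List Int),
          if z ≠ 0 then st.2 ++ [(x + y) * z] else st.2))]

-- ===== VERDICT (by name: the statement is the Claim_ definition above) =====
theorem searching_spec : Claim_equal_searching := by
  intro v _
  unfold Spec_searching searching searching_alt
  rw [pv_build_eq v]
  simp only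
  rw [PySem.List.foldl_pyRange_zero_pyGetD (PySem.List.sorted (pvL1 v) (fun x => x)) 0
      (f := fun result x => result +
        ((PySem.List.bisectRight (PySem.List.sorted (pvL2 v) (fun x => x)) x : Int)
         - (PySem.List.bisectLeft (PySem.List.sorted (pvL2 v) (fun x => x)) x : Int)))]
  rw [PySem.List.foldl_add]
  rw [List.map_congr_left (fun x _ =>
    pv_bisect_diff (PySem.List.sorted (pvL2 v) (fun x => x)) x
      (PySem.List.sorted_pairwise (pvL2 v) (fun x => x)))]
  have hperm2 : ∀ x : Int,
      (PySem.List.sorted (pvL2 v) (fun x => x)).count x = (pvL2 v).count x :=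
    fun x => (PySem.List.sorted_perm (pvL2 v) (fun x => x) false).count_eq x
  simp only [hperm2, PySem.Dict.getD_counter]
  have hperm1 := ((PySem.List.sorted_perm (pvL1 v) (fun x => x) false).map
    (fun x => ((pvL2 v).count x : Int))).sum_eq
  rw [zero_add, hperm1]
  rfl
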